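-- pv_equiv track=rewrite | github.com/ariunbayar/geowms | govorg/backend/role_org/views.py | _get_convert_display_name
-- ===== SOURCE A (Python) =====
-- def _get_convert_display_name(perm_list):
--
--     roles = {
--         'PERM_VIEW': False,
--         'PERM_CREATE': False,
--         'PERM_REMOVE': False,
--         'PERM_UPDATE': False,
--         'PERM_APPROVE': False,
--         'PERM_REVOKE': False,
--     }
--
--     for perm in perm_list:
--         if perm == 1:
--             roles['PERM_VIEW'] = True
--
--         if perm == 2:
--             roles['PERM_CREATE'] = True
--
--         if perm == 3:
--             roles['PERM_REMOVE'] = True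
--
--         if perm == 4:
--             roles['PERM_UPDATE'] = True
--
--         if perm == 5:
--             roles['PERM_APPROVE'] = True
--
--         if perm == 6:
--             roles['PERM_REVOKE'] = True
--
--     return roles
-- ===== SOURCE B (Python) =====
-- _MAPPING = {
--     1: 'PERM_VIEW',
--     2: 'PERM_CREATE',
--     3: 'PERM_REMOVE',
--     4: 'PERM_UPDATE',
--     5: 'PERM_APPROVE',
--     6: 'PERM_REVOKE',
-- }
--
--
-- def _get_convert_display_name(perm_list):
--     perms = list(perm_list)
--     return {name: code in perms for code, name in _MAPPING.items()}
-- ===== Notes on version B (the rewrite author's own statement) =====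
-- stated objective: idiomatic
-- what changed: Replaces the input-driven loop that flips six boolean flags with an output-driven dict comprehension over a fixed code-to-name mapping, using one membership test per flag.
import Mathlib
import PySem

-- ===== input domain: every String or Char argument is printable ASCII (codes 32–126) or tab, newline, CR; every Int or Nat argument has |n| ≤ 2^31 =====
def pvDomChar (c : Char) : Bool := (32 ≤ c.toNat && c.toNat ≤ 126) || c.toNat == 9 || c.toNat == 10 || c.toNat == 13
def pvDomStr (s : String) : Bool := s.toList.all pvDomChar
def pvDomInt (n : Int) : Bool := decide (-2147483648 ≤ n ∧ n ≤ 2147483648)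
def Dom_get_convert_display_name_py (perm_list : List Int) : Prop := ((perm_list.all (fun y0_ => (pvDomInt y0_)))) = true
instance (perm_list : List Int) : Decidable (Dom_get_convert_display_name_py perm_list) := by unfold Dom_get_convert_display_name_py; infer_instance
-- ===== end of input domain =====

-- B replaces A's input-driven flag-flipping loop with an output-driven map over a
-- fixed code→name table, one membership test per flag (idiomatic decomposition).


-- ===== PORT A =====
def pvStepA (roles : PySem.Dict String Bool) (perm : Int) : PySem.Dict String Bool :=
  let roles := if perm == 1 then roles.insert "PERM_VIEW" true else roles
  let roles := if perm == 2 then roles.insert "PERM_CREATE" true else roles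
  let roles := if perm == 3 then roles.insert "PERM_REMOVE" true else roles
  let roles := if perm == 4 then roles.insert "PERM_UPDATE" true else roles
  let roles := if perm == 5 then roles.insert "PERM_APPROVE" true else roles
  let roles := if perm == 6 then roles.insert "PERM_REVOKE" true else roles
  roles

def get_convert_display_name_py (perm_list : List Int) : List (String × Bool) :=
  (perm_list.foldl pvStepA
    (PySem.Dict.ofList [("PERM_VIEW", false), ("PERM_CREATE", false), ("PERM_REMOVE", false),
                        ("PERM_UPDATE", false), ("PERM_APPROVE", false), ("PERM_REVOKE", false)])).items

-- ===== PORT B =====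
def pvMapping : List (Int × String) :=
  [(1, "PERM_VIEW"), (2, "PERM_CREATE"), (3, "PERM_REMOVE"),
   (4, "PERM_UPDATE"), (5, "PERM_APPROVE"), (6, "PERM_REVOKE")]

def get_convert_display_name_py_alt (perm_list : List Int) : List (String × Bool) :=
  pvMapping.map (fun p => (p.2, perm_list.contains p.1))

-- ===== PRECONDITION & SPEC =====
def Spec_get_convert_display_name_py (perm_list : List Int) (out : List (String × Bool)) : Prop := out = get_convert_display_name_py_alt perm_list
instance (perm_list : List Int) (out : List (String × Bool)) : Decidable (Spec_get_convert_display_name_py perm_list out) := by unfold Spec_get_convert_display_name_py; infer_instance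

-- ===== CLAIM (what is proved, stated in full; the proofs are below) =====
def Claim_equal_get_convert_display_name_py : Prop := ∀ (perm_list : List Int), Dom_get_convert_display_name_py perm_list → Spec_get_convert_display_name_py perm_list (get_convert_display_name_py perm_list)

-- ===== LEMMAS AND PROOFS =====

def pvDictOf (b1 b2 b3 b4 b5 b6 : Bool) : PySem.Dict String Bool :=
  PySem.Dict.mk [("PERM_VIEW", b1), ("PERM_CREATE", b2), ("PERM_REMOVE", b3),
                 ("PERM_UPDATE", b4), ("PERM_APPROVE", b5), ("PERM_REVOKE", b6)]

theorem pvStepA_dictOf (b1 b2 b3 b4 b5 b6 : Bool) (x : Int) :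
    pvStepA (pvDictOf b1 b2 b3 b4 b5 b6) x =
    pvDictOf (b1 || x == 1) (b2 || x == 2) (b3 || x == 3)
             (b4 || x == 4) (b5 || x == 5) (b6 || x == 6) := by
  simp only [pvStepA, pvDictOf]
  split_ifs with h1 h2 h3 h4 h5 h6 <;> simp_all [PySem.Dict.insert]

theorem pvLoop (l : List Int) (b1 b2 b3 b4 b5 b6 : Bool) :
    l.foldl pvStepA (pvDictOf b1 b2 b3 b4 b5 b6) =
    pvDictOf (b1 || l.contains 1) (b2 || l.contains 2) (b3 || l.contains 3)
             (b4 || l.contains 4) (b5 || l.contains 5) (b6 || l.contains 6) := by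
  induction l generalizing b1 b2 b3 b4 b5 b6 with
  | nil => simp
  | cons x l ih =>
    rw [List.foldl_cons, pvStepA_dictOf, ih]
    simp [Bool.or_assoc, beq_eq_decide, eq_comm]

-- ===== VERDICT (by name: the statement is the Claim_ definition above) =====
theorem get_convert_display_name_py_spec : Claim_equal_get_convert_display_name_py := by
  intro perm_list _
  show _ = _
  have h0 : PySem.Dict.ofList [("PERM_VIEW", false), ("PERM_CREATE", false), ("PERM_REMOVE", false),
      ("PERM_UPDATE", false), ("PERM_APPROVE", false), ("PERM_REVOKE", false)] =
      pvDictOf false false false false false false := by decide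
  rw [get_convert_display_name_py, h0, pvLoop]
  simp [pvDictOf, get_convert_display_name_py_alt, pvMapping]
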